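-- pv_equiv track=rewrite | github.com/Jordan231111/CodeForce-Solutions | false_alarm.py | can_pass
-- ===== SOURCE A (Python) =====
-- from typing import List
--
-- def can_pass(n: int, x: int, doors: List[int]) -> bool:
--     """Return True if Yousef can reach the exit using the button at most once."""
--     # Find indices of first and last closed doors (state == 1).
--     first = last = None
--     for i, d in enumerate(doors):
--         if d == 1:
--             if first is None:
--                 first = i
--             last = i
--     # According to problem statement, there is at least one closed door.
--     # Safety fallback in case of malformed input.
--     if first is None or last is None:
--         return True
--     return (last - first) < x
-- ===== SOURCE B (Python) =====
-- def can_pass(n: int, x: int, doors: list) -> bool: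
--     """Return True if Yousef can reach the exit using the button at most once."""
--     # Sliding-window reformulation: all closed doors must fit in some window of
--     # width x; check via prefix sums of closed-door counts.
--     total = sum(1 for d in doors if d == 1)
--     if total == 0:
--         return True
--     if x <= 0:
--         return False
--     pref = [0]
--     for d in doors:
--         pref.append(pref[-1] + (1 if d == 1 else 0))
--     m = len(doors)
--     return any(pref[min(i + x, m)] - pref[i] == total for i in range(m))
-- ===== Notes on version B (the rewrite author's own statement) =====
-- stated objective: alternative
-- what changed: Replaces A's first/last-index accumulation with a sliding-window formulation: count all closed doors, build a prefix-sum array, and check whether some window of width x contains every closed door.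
import Mathlib
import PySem

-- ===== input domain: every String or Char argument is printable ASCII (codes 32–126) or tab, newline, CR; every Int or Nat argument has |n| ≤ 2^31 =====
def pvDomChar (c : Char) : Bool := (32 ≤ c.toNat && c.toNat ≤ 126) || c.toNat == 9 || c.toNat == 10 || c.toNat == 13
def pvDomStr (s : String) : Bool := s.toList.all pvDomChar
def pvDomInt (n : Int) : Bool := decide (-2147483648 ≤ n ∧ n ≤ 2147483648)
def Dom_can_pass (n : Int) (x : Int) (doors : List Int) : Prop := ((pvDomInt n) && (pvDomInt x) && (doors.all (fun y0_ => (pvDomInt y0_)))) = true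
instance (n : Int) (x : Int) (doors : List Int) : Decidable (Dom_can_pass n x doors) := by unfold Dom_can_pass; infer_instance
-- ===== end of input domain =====

-- B replaces A's first/last-index accumulation by a sliding-window check: count all closed
-- doors, build prefix sums, and test whether some width-x window contains them all (same O(n) cost).


-- ===== PORT A =====
-- A's loop body: on d == 1, set first if still None, always set last.
def canPassStep (fl : Option Nat × Option Nat) (di : Int × Nat) : Option Nat × Option Nat :=
  if di.1 = 1 then
    (match fl.1 with
     | none => some di.2
     | some f => some f, some di.2)
  else fl

def can_pass (n : Int) (x : Int) (doors : List Int) : Bool :=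
  let st := doors.zipIdx.foldl canPassStep (none, none)
  match st.1, st.2 with
  | some f, some l => decide ((l : Int) - (f : Int) < x)
  | _, _ => true

-- ===== PORT B =====
-- pref[-1] via pyGetD with default 0: pref always starts as [0], so the default is never used.
def can_pass_alt (n : Int) (x : Int) (doors : List Int) : Bool :=
  let total : Int := doors.foldl (fun acc d => if d = 1 then acc + 1 else acc) 0
  if total = 0 then true
  else if x ≤ 0 then false
  else
    let pref : List Int :=
      doors.foldl (fun pref d => pref ++ [PySem.List.pyGetD pref (-1) 0 + (if d = 1 then 1 else 0)]) [0]
    let m : Int := (doors.length : Int)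
    (PySem.List.pyRange 0 m 1).any (fun i =>
      decide (PySem.List.pyGetD pref (min (i + x) m) 0 - PySem.List.pyGetD pref i 0 = total))

-- ===== PRECONDITION & SPEC =====
def Spec_can_pass (n : Int) (x : Int) (doors : List Int) (out : Bool) : Prop := out = can_pass_alt n x doors
instance (n : Int) (x : Int) (doors : List Int) (out : Bool) : Decidable (Spec_can_pass n x doors out) := by unfold Spec_can_pass; infer_instance

-- ===== CLAIM (what is proved, stated in full; the proofs are below) =====
def Claim_equal_can_pass : Prop := ∀ (n : Int) (x : Int) (doors : List Int), Dom_can_pass n x doors → Spec_can_pass n x doors (can_pass n x doors)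

-- ===== LEMMAS AND PROOFS =====

-- Characterisation of A's loop: first = first index of 1 (shifted by the start offset),
-- last = last index of 1 (computed from the reverse-first index), accumulator-generalised.
theorem canPass_loop_char (doors : List Int) (k : Nat) (acc : Option Nat × Option Nat) :
    (doors.zipIdx k).foldl canPassStep acc =
      ((match acc.1 with
        | some f => some f
        | none => (PySem.List.index? doors 1).map (· + k)),
       (match PySem.List.index? doors.reverse 1 with
        | some r => some (k + doors.length - 1 - r)
        | none => acc.2)) := by
  induction doors generalizing k acc with
  | nil =>
    refine Prod.ext ?_ ?_ <;> simp [PySem.List.index?] <;> cases acc.1 <;> simp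
  | cons d ds ih =>
    rw [List.zipIdx_cons, List.foldl_cons, ih]
    by_cases hd : d = 1
    · subst hd
      have h1 : PySem.List.index? ((1 : Int) :: ds) 1 = some 0 :=
        PySem.List.index?_cons_self ..
      by_cases hm : (1 : Int) ∈ ds
      · have hmr : (1 : Int) ∈ ds.reverse := by simpa using hm
        have h2 : PySem.List.index? (((1:Int) :: ds).reverse) 1 = PySem.List.index? ds.reverse 1 := by
          simpa using PySem.List.index?_append_of_mem [(1:Int)] hmr
        obtain ⟨r, hr⟩ := Option.isSome_iff_exists.mp
          ((PySem.List.index?_isSome_iff (xs := ds.reverse) (v := (1:Int))).mpr hmr)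
        have hrlen : r < ds.reverse.length := by
          obtain ⟨hk, _, _⟩ := PySem.List.getElem_of_index?_eq_some hr
          exact hk
        simp only [h1, h2, hr, canPassStep, List.length_cons]
        refine Prod.ext ?_ ?_
        · cases acc.1 <;> simp
        · simp only
          congr 1
          simp at hrlen
          omega
      · have hmr : (1 : Int) ∉ ds.reverse := by simpa using hm
        have h2 : PySem.List.index? (ds.reverse ++ [(1:Int)]) 1 = some ds.reverse.length :=
          PySem.List.index?_append_singleton_self ds.reverse 1 hmr
        have h3 : PySem.List.index? ds.reverse 1 = none :=
          (PySem.List.index?_eq_none_iff ..).mpr hmr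
        simp only [h1, h3, canPassStep, List.reverse_cons, h2, List.length_cons,
          List.length_reverse]
        refine Prod.ext ?_ ?_
        · cases acc.1 <;> simp
        · simp
    · have h1 : PySem.List.index? (d :: ds) 1 = (PySem.List.index? ds 1).map (· + 1) :=
        PySem.List.index?_cons_of_ne ds hd
      have hstep : canPassStep acc (d, k) = acc := by simp [canPassStep, hd]
      rw [hstep, h1]
      refine Prod.ext ?_ ?_
      · cases acc.1 with
        | some f => simp
        | none =>
          simp only
          cases PySem.List.index? ds 1 <;> simp
          omega
      · simp only [List.reverse_cons]
        by_cases hm : (1 : Int) ∈ ds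
        · have hmr : (1 : Int) ∈ ds.reverse := by simpa using hm
          have h2 : PySem.List.index? (ds.reverse ++ [d]) 1 = PySem.List.index? ds.reverse 1 :=
            PySem.List.index?_append_of_mem [d] hmr
          rw [h2]
          obtain ⟨r, hr⟩ := Option.isSome_iff_exists.mp
            ((PySem.List.index?_isSome_iff (xs := ds.reverse) (v := (1:Int))).mpr hmr)
          simp only [hr, List.length_cons]
          congr 1
          omega
        · have hmr : (1 : Int) ∉ ds.reverse ++ [d] := by simp [hm]; tauto
          have h2 : PySem.List.index? (ds.reverse ++ [d]) 1 = none :=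
            (PySem.List.index?_eq_none_iff ..).mpr hmr
          have h3 : PySem.List.index? ds.reverse 1 = none :=
            (PySem.List.index?_eq_none_iff ..).mpr (by simpa using hm)
          rw [h2, h3]

-- The prefix-sum list B builds is the map of closed-door counts over prefixes.
theorem pref_char (doors : List Int) :
    doors.foldl (fun pref d => pref ++ [PySem.List.pyGetD pref (-1) 0 + (if d = 1 then 1 else 0)]) [0]
      = (List.range (doors.length + 1)).map
          (fun k => (((doors.take k).countP (fun d => d = 1)) : Int)) := by
  induction doors using List.reverseRecOn with
  | nil => simp
  | append_singleton ds d ih =>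
    rw [List.foldl_append, List.foldl_cons, List.foldl_nil, ih]
    have hsplit : (List.range (ds.length + 1)).map
          (fun k => (((ds.take k).countP (fun d => d = 1)) : Int))
        = (List.range ds.length).map
            (fun k => (((ds.take k).countP (fun d => d = 1)) : Int))
          ++ [(((ds.take ds.length).countP (fun d => d = 1)) : Int)] := by
      rw [List.range_succ, List.map_append, List.map_singleton]
    have hlast : PySem.List.pyGetD ((List.range (ds.length + 1)).map
          (fun k => (((ds.take k).countP (fun d => d = 1)) : Int))) (-1) 0
        = (((ds.take ds.length).countP (fun d => d = 1)) : Int) := by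
      rw [hsplit, PySem.List.pyGetD_neg_one_append_singleton]
    rw [hlast, List.length_append, List.length_singleton]
    conv_rhs => rw [List.range_succ, List.map_append, List.map_singleton]
    congr 1
    · apply List.map_congr_left
      intro k hk
      simp only [List.mem_range] at hk
      rw [List.take_append_of_le_length (by omega)]
    · have htk : List.take (ds.length + 1) (ds ++ [d]) = ds ++ [d] :=
        List.take_of_length_le (by simp)
      rw [htk, List.countP_append]
      by_cases hd : d = 1 <;> simp [hd]

-- countP of a prefix is zero iff the prefix stops at or before the first 1.
theorem cnt_take_eq_zero_iff (doors : List Int) (f : Nat)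
    (hf : PySem.List.index? doors 1 = some f) (k : Nat) :
    ((doors.take k).countP (fun d => d = 1) = 0) ↔ k ≤ f := by
  obtain ⟨hfm, hf1, hfmin⟩ := PySem.List.getElem_of_index?_eq_some hf
  constructor
  · intro h
    by_contra hk
    have hlen : f < (doors.take k).length := by simp; omega
    have hmem : (1 : Int) ∈ doors.take k := by
      have hgt : (doors.take k)[f]'hlen = doors[f] := List.getElem_take
      rw [← hf1, ← hgt]
      exact List.getElem_mem _
    have := List.countP_eq_zero.mp h 1 hmem
    simp at this
  · intro hk
    apply List.countP_eq_zero.mpr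
    intro a ha
    obtain ⟨j, hj, hja⟩ := List.getElem_of_mem ha
    have hjf : j < f := by simp at hj; omega
    have : doors[j]'(by omega) ≠ 1 := hfmin j hjf
    rw [List.getElem_take] at hja
    simp [← hja, this]

theorem cnt_take_eq_total_iff (doors : List Int) (r : Nat)
    (hr : PySem.List.index? doors.reverse 1 = some r) (k : Nat) (hk : k ≤ doors.length) :
    ((doors.take k).countP (fun d => d = 1) = doors.countP (fun d => d = 1)) ↔
      doors.length - 1 - r < k := by
  obtain ⟨hrm, hr1, hrmin⟩ := PySem.List.getElem_of_index?_eq_some hr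
  have hrm' : r < doors.length := by simpa using hrm
  rw [List.getElem_reverse] at hr1
  have hsplit : doors.countP (fun d => d = 1)
      = (doors.take k).countP (fun d => d = 1) + (doors.drop k).countP (fun d => d = 1) := by
    rw [← List.countP_append, List.take_append_drop]
  constructor
  · intro h
    by_contra hlk
    have hlen : doors.length - 1 - r - k < (doors.drop k).length := by simp; omega
    have hmem : (1 : Int) ∈ doors.drop k := by
      have hgt : (doors.drop k)[doors.length - 1 - r - k]'hlen
          = doors[k + (doors.length - 1 - r - k)]'(by omega) := List.getElem_drop
      have : doors[k + (doors.length - 1 - r - k)]'(by omega) = 1 := by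
        have : k + (doors.length - 1 - r - k) = doors.length - 1 - r := by omega
        simp_rw [this]; exact hr1
      rw [← this, ← hgt]
      exact List.getElem_mem _
    have hpos : 0 < (doors.drop k).countP (fun d => d = 1) :=
      List.countP_pos_iff.mpr ⟨1, hmem, by simp⟩
    omega
  · intro hlk
    have hdrop : (doors.drop k).countP (fun d => d = 1) = 0 := by
      apply List.countP_eq_zero.mpr
      intro a ha
      obtain ⟨j, hj, hja⟩ := List.getElem_of_mem ha
      have hjd : k + j < doors.length := by simp at hj; omega
      rw [List.getElem_drop] at hja
      have hne : doors[k + j]'hjd ≠ 1 := by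
        have hrev : doors.reverse[doors.length - 1 - (k + j)]'(by simp; omega) ≠ 1 :=
          hrmin _ (by omega)
        rw [List.getElem_reverse] at hrev
        have : doors.length - 1 - (doors.length - 1 - (k + j)) = k + j := by omega
        simp_rw [this] at hrev
        exact hrev
      simp [← hja, hne]
    omega

-- ===== VERDICT (by name: the statement is the Claim_ definition above) =====
theorem can_pass_spec : Claim_equal_can_pass := by
  intro n x doors _
  unfold Spec_can_pass can_pass can_pass_alt
  rw [show doors.zipIdx = doors.zipIdx 0 from rfl, canPass_loop_char]
  dsimp only
  rw [PySem.List.foldl_ite_add_one, pref_char]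
  simp only [zero_add]
  cases hf : PySem.List.index? doors 1 with
  | none =>
    have hnm : (1 : Int) ∉ doors := (PySem.List.index?_eq_none_iff ..).mp hf
    have hr : PySem.List.index? doors.reverse 1 = none :=
      (PySem.List.index?_eq_none_iff ..).mpr (by simpa using hnm)
    have hcnt : doors.countP (fun d => d = 1) = 0 :=
      List.countP_eq_zero.mpr (fun a ha => by simp; intro h; exact hnm (h ▸ ha))
    rw [hr, hcnt]
    simp
  | some f =>
    have hmem : (1 : Int) ∈ doors := by
      rw [← PySem.List.index?_isSome_iff (xs := doors) (v := (1:Int)), hf]; rfl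
    obtain ⟨r, hr⟩ := Option.isSome_iff_exists.mp
      ((PySem.List.index?_isSome_iff (xs := doors.reverse) (v := (1:Int))).mpr (by simpa using hmem))
    have hcntpos : 0 < doors.countP (fun d => d = 1) :=
      List.countP_pos_iff.mpr ⟨1, hmem, by simp⟩
    have hrlen : r < doors.length := by
      obtain ⟨hk, _, _⟩ := PySem.List.getElem_of_index?_eq_some hr
      simpa using hk
    have hflen : f < doors.length := by
      obtain ⟨hk, _, _⟩ := PySem.List.getElem_of_index?_eq_some hf
      exact hk
    -- the last closed-door index, as a Nat
    set l : Nat := doors.length - 1 - r with hl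
    -- f ≤ l: otherwise the prefix of length f would already contain every 1
    have hfl : f ≤ l := by
      by_contra hlt
      have h1 := (cnt_take_eq_total_iff doors r hr f (by omega)).mpr (by omega)
      have h2 := (cnt_take_eq_zero_iff doors f hf f).mpr (le_refl f)
      omega
    rw [hr]
    dsimp only [Option.map_some]
    simp only [Nat.add_zero]
    have htot : ((doors.countP (fun d => d = 1) : Int)) ≠ 0 := by
      exact_mod_cast hcntpos.ne'
    rw [if_neg htot]
    by_cases hx : x ≤ 0
    · rw [if_pos hx]
      simp only [decide_eq_false_iff_not, not_lt]
      omega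
    · rw [if_neg hx]
      apply Bool.eq_iff_iff.mpr
      simp only [decide_eq_true_iff, List.any_eq_true, PySem.List.mem_pyRange_one,
        decide_eq_true_iff]
      constructor
      · intro hspan
        refine ⟨(f : Int), ⟨by omega, by omega⟩, ?_⟩
        have h0 : (0:Int) ≤ min ((f:Int) + x) (doors.length : Int) := by omega
        rw [PySem.List.pyGetD_eq_getElem _ 0 h0 (by simp),
            PySem.List.pyGetD_eq_getElem _ 0 (by omega) (by simp; omega)]
        simp only [List.getElem_map, List.getElem_range]
        have hKl : ((min ((f:Int) + x) (doors.length : Int)).toNat) ≤ doors.length := by omega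
        rw [(cnt_take_eq_total_iff doors r hr _ hKl).mpr (by omega),
            (cnt_take_eq_zero_iff doors f hf _).mpr (by omega)]
        push_cast
        omega
      · rintro ⟨i, ⟨hi0, him⟩, hi⟩
        have h0 : (0:Int) ≤ min (i + x) (doors.length : Int) := by omega
        rw [PySem.List.pyGetD_eq_getElem _ 0 h0 (by simp),
            PySem.List.pyGetD_eq_getElem _ 0 hi0 (by simp; omega)] at hi
        simp only [List.getElem_map, List.getElem_range] at hi
        have hKl : ((min (i + x) (doors.length : Int)).toNat) ≤ doors.length := by omega
        have hub : (doors.take ((min (i + x) (doors.length : Int)).toNat)).countP (fun d => d = 1)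
            ≤ doors.countP (fun d => d = 1) := by
          conv_rhs => rw [← List.take_append_drop ((min (i + x) (doors.length : Int)).toNat) doors]
          rw [List.countP_append]
          omega
        have hKtot : (doors.take ((min (i + x) (doors.length : Int)).toNat)).countP (fun d => d = 1)
            = doors.countP (fun d => d = 1) := by omega
        have hI0 : (doors.take i.toNat).countP (fun d => d = 1) = 0 := by omega
        have hK := (cnt_take_eq_total_iff doors r hr _ hKl).mp hKtot
        have hI := (cnt_take_eq_zero_iff doors f hf _).mp hI0
        omega
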